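-- pv_equiv track=rewrite | github.com/pypi-data/pypi-mirror-386 | packages/fastapi-mongo-base/fastapi_mongo_base-1.0.39.tar.gz/fastapi_mongo_base-1.0.39/src/fastapi_mongo_base/utils/basic.py | get_base_field_name
-- ===== SOURCE A (Python) =====
-- def get_base_field_name(field: str) -> str:
--     """Extract the base field name by removing suffixes."""
--     suffixes = [
--         "_from",
--         "_to",
--         "_in",
--         "_nin",
--         "_ne",
--         "_eq",
--         "_gt",
--         "_gte",
--         "_lt",
--         "_lte",
--         "_like",
--     ]
--     if "." in field:
--         field = field.split(".")[0]
--     for suffix in suffixes: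
--         if field.endswith(suffix):
--             return field[: -len(suffix)]
--
--     return field
-- ===== SOURCE B (Python) =====
-- _SUFFIX_SET = {
--     "_from", "_to", "_in", "_nin", "_ne", "_eq",
--     "_gt", "_gte", "_lt", "_lte", "_like",
-- }
--
--
-- def get_base_field_name(field: str) -> str:
--     """Extract the base field name by removing suffixes."""
--     if "." in field:
--         field = field.split(".")[0]
--     idx = field.rfind("_")
--     if idx != -1 and field[idx:] in _SUFFIX_SET:
--         return field[:idx]
--     return field
-- ===== Notes on version B (the rewrite author's own statement) =====
-- stated objective: idiomatic
-- what changed: Replaced the 11-iteration suffix loop with a single rfind('_') locating the only possible match point, followed by one set-membership test on the tail; every known suffix is '_'+word with no inner underscore, so the tail from the last underscore is the only candidate.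
import Mathlib
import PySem

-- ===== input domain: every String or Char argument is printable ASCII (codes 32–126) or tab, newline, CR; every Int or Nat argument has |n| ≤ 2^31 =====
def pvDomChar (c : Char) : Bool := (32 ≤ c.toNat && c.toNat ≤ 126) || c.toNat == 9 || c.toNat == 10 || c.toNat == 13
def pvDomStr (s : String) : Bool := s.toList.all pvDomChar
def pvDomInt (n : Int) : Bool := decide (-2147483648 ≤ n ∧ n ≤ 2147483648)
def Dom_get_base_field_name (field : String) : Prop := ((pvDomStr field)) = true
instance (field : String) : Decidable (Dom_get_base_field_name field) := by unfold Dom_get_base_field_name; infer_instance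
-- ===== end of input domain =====

-- B replaces A's 11-iteration suffix loop by a single rfind('_') plus one set-membership
-- test on the tail from the last underscore (every known suffix is '_'+word, so the tail
-- from the last underscore is the only possible match).


-- ===== PORT A =====
def pvSuffixes : List String :=
  ["_from", "_to", "_in", "_nin", "_ne", "_eq", "_gt", "_gte", "_lt", "_lte", "_like"]

-- the 'for suffix in suffixes: if field.endswith(suffix): return field[:-len(suffix)]' loop
def pvLoopA : List String → String → String
  | [], f => f
  | suf :: rest, f =>
    if PySem.Str.endswith f suf then PySem.Str.slice f none (some (-(PySem.Str.len suf)))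
    else pvLoopA rest f

def get_base_field_name (field : String) : String :=
  -- 'if "." in field: field = field.split(".")[0]' — split? is some (sep ≠ "") and the
  -- result list is nonempty, so neither default is ever used
  let field :=
    if PySem.Str.isIn "." field then
      (PySem.List.pyGet? ((PySem.Str.split? field ".").getD []) 0).getD ""
    else field
  pvLoopA pvSuffixes field

-- ===== PORT B =====
def pvSuffixSet : PySem.Set String :=
  PySem.Set.ofList
    ["_from", "_to", "_in", "_nin", "_ne", "_eq", "_gt", "_gte", "_lt", "_lte", "_like"]

def get_base_field_name_alt (field : String) : String :=
  let field :=
    if PySem.Str.isIn "." field then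
      (PySem.List.pyGet? ((PySem.Str.split? field ".").getD []) 0).getD ""
    else field
  let idx := PySem.Str.rfind field "_"
  if idx != -1 && PySem.Set.contains pvSuffixSet (PySem.Str.slice field (some idx) none) then
    PySem.Str.slice field none (some idx)
  else field

-- ===== PRECONDITION & SPEC =====
def Spec_get_base_field_name (field : String) (out : String) : Prop := out = get_base_field_name_alt field
instance (field : String) (out : String) : Decidable (Spec_get_base_field_name field out) := by unfold Spec_get_base_field_name; infer_instance

-- ===== CLAIM (what is proved, stated in full; the proofs are below) =====
def Claim_equal_get_base_field_name : Prop := ∀ (field : String), Dom_get_base_field_name field → Spec_get_base_field_name field (get_base_field_name field)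

-- ===== LEMMAS AND PROOFS =====

lemma rfind_go_not_mem (l : List Char) (hs : '_' ∉ l) :
    ∀ k, PySem.Chars.rfind.go l ['_'] k = -1 := by
  intro k
  induction k with
  | zero =>
    simp only [PySem.Chars.rfind.go]
    split_ifs with h
    · exact absurd ((List.isPrefixOf_iff_prefix.mp h).subset (List.mem_singleton.mpr rfl)) hs
    · rfl
  | succ j ih =>
    simp only [PySem.Chars.rfind.go]
    split_ifs with h
    · exact absurd (List.mem_of_mem_drop
        ((List.isPrefixOf_iff_prefix.mp h).subset (List.mem_singleton.mpr rfl))) hs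
    · exact ih

lemma rfind_go_last (u v : List Char) (hv : '_' ∉ v) :
    ∀ k, u.length ≤ k → PySem.Chars.rfind.go (u ++ '_' :: v) ['_'] k = (u.length : Int) := by
  intro k
  induction k with
  | zero =>
    intro hk
    have hu : u = [] := List.eq_nil_of_length_eq_zero (Nat.le_zero.mp hk)
    subst hu
    simp [PySem.Chars.rfind.go, List.isPrefixOf]
  | succ j ih =>
    intro _
    rcases Nat.lt_or_ge j u.length with hj | hj
    · have he : u.length = j + 1 := by omega
      simp only [PySem.Chars.rfind.go]
      rw [← he, List.drop_left]
      simp [List.isPrefixOf, he]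
    · have hdrop : List.drop (j + 1) (u ++ '_' :: v) = List.drop (j - u.length) v := by
        rw [List.drop_append, List.drop_eq_nil_of_le (by omega), List.nil_append,
            show j + 1 - u.length = (j - u.length) + 1 from by omega, List.drop_succ_cons]
      simp only [PySem.Chars.rfind.go]
      split_ifs with h
      · exact absurd (List.mem_of_mem_drop (hdrop ▸
          (List.isPrefixOf_iff_prefix.mp h).subset (List.mem_singleton.mpr rfl))) hv
      · exact ih hj

lemma last_underscore {l : List Char} (h : '_' ∈ l) :
    ∃ u v, l = u ++ '_' :: v ∧ '_' ∉ v := by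
  induction l with
  | nil => cases h
  | cons a t ih =>
    by_cases ht : '_' ∈ t
    · obtain ⟨u, v, rfl, hv⟩ := ih ht
      exact ⟨a :: u, v, rfl, hv⟩
    · have ha : a = '_' := by
        rcases List.mem_cons.mp h with h' | h'
        · exact h'.symm
        · exact absurd h' ht
      exact ⟨[], t, by simp [ha], ht⟩

lemma ends_iff (u v w : List Char) (hv : '_' ∉ v) (hw : '_' ∉ w) :
    ('_' :: w) <:+ (u ++ '_' :: v) ↔ w = v := by
  constructor
  · intro h
    have h2 : ('_' :: v) <:+ (u ++ '_' :: v) := List.suffix_append u ('_' :: v)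
    rcases List.suffix_or_suffix_of_suffix h h2 with h3 | h3
    · obtain ⟨t, ht⟩ := h3
      cases t with
      | nil => simpa using ht
      | cons a t' =>
        exfalso
        injection ht with h1 h2
        exact hv (h2 ▸ List.mem_append_right t' List.mem_cons_self)
    · obtain ⟨t, ht⟩ := h3
      cases t with
      | nil => have := ht; simp at this; exact this.symm
      | cons a t' =>
        exfalso
        injection ht with h1 h2
        exact hw (h2 ▸ List.mem_append_right t' List.mem_cons_self)
  · rintro rfl
    exact List.suffix_append u ('_' :: w)


lemma loopA_no_match (L : List String) (s : String) (hs : '_' ∉ s.toList)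
    (hL : ∀ t ∈ L, '_' ∈ t.toList) : pvLoopA L s = s := by
  induction L with
  | nil => rfl
  | cons suf rest ih =>
    have hfalse : PySem.Str.endswith s suf = false := by
      rw [PySem.Str.endswith_eq]
      cases hb : PySem.Chars.endswith s.toList suf.toList with
      | false => rfl
      | true =>
        have hsuf : suf.toList <:+ s.toList := (PySem.Chars.endswith_iff _ _).mp hb
        exact absurd (hsuf.subset (hL suf List.mem_cons_self)) hs
    rw [pvLoopA, hfalse]
    simp only [Bool.false_eq_true, if_false]
    exact ih fun t ht => hL t (List.mem_cons_of_mem _ ht)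

lemma ends_eq (s : String) (u v : List Char) (hs : s.toList = u ++ '_' :: v) (hv : '_' ∉ v)
    (t : String) (w : List Char) (ht : t.toList = '_' :: w) (hw : '_' ∉ w) :
    PySem.Str.endswith s t = decide (w = v) := by
  rw [PySem.Str.endswith_eq, hs, ht]
  rcases Decidable.em (w = v) with h | h
  · subst h
    simp
    exact (PySem.Chars.endswith_iff _ _).mpr ((ends_iff u w w hv hw).mpr rfl)
  · have hns : ¬ ('_' :: w) <:+ (u ++ '_' :: v) := fun hc => h ((ends_iff u v w hv hw).mp hc)
    simp [h]
    cases hb : PySem.Chars.endswith (u ++ '_' :: v) ('_' :: w) with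
    | false => rfl
    | true => exact absurd ((PySem.Chars.endswith_iff _ _).mp hb) hns

lemma strip_eq' (s : String) (u v : List Char) (hs : s.toList = u ++ '_' :: v)
    (t : String) (w : List Char) (ht : t.toList = '_' :: w) (hvw : w = v) :
    PySem.Str.slice s none (some (-(PySem.Str.len t))) =
      PySem.Str.slice s none (some (u.length : Int)) := by
  subst hvw
  rw [PySem.Str.len_eq, ht]
  apply String.toList_inj.mp
  rw [PySem.Str.toList_slice, PySem.Str.toList_slice,
      PySem.Chars.slice_eq_listSlice, PySem.Chars.slice_eq_listSlice,
      PySem.List.slice_to_neg_natCast _ _ (by simp),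
      PySem.List.slice_to_natCast, hs]
  have hlen : (u ++ '_' :: w).length - ('_' :: w).length = u.length := by
    simp
  rw [hlen, List.take_left]

lemma suffixes_shape : ∀ t ∈ pvSuffixes, ∃ w, t.toList = '_' :: w ∧ '_' ∉ w := by
  intro t ht
  simp only [pvSuffixes, List.mem_cons, List.not_mem_nil, or_false] at ht
  rcases ht with rfl | rfl | rfl | rfl | rfl | rfl | rfl | rfl | rfl | rfl | rfl
  exacts [⟨"from".toList, rfl, by decide⟩, ⟨"to".toList, rfl, by decide⟩,
    ⟨"in".toList, rfl, by decide⟩, ⟨"nin".toList, rfl, by decide⟩,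
    ⟨"ne".toList, rfl, by decide⟩, ⟨"eq".toList, rfl, by decide⟩,
    ⟨"gt".toList, rfl, by decide⟩, ⟨"gte".toList, rfl, by decide⟩,
    ⟨"lt".toList, rfl, by decide⟩, ⟨"lte".toList, rfl, by decide⟩,
    ⟨"like".toList, rfl, by decide⟩]

lemma loopA_eq (s : String) (u v : List Char) (hs : s.toList = u ++ '_' :: v) (hv : '_' ∉ v)
    (L : List String) (hW : ∀ t ∈ L, ∃ w, t.toList = '_' :: w ∧ '_' ∉ w) :
    pvLoopA L s =
      if ∃ t ∈ L, t.toList = '_' :: v then PySem.Str.slice s none (some (u.length : Int))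
      else s := by
  induction L with
  | nil => rw [pvLoopA, if_neg (by simp)]
  | cons t rest ih =>
    obtain ⟨w, htw, hw⟩ := hW t List.mem_cons_self
    rw [pvLoopA, ends_eq s u v hs hv t w htw hw]
    by_cases hwv : w = v
    · rw [if_pos (by simp [hwv]), if_pos ⟨t, List.mem_cons_self, by rw [htw, hwv]⟩]
      exact strip_eq' s u v hs t w htw hwv
    · rw [if_neg (by simp [hwv]), ih (fun t' ht' => hW t' (List.mem_cons_of_mem _ ht'))]
      by_cases hex : ∃ t' ∈ rest, t'.toList = '_' :: v
      · obtain ⟨t', h1, h2⟩ := hex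
        rw [if_pos ⟨t', h1, h2⟩, if_pos ⟨t', List.mem_cons_of_mem _ h1, h2⟩]
      · rw [if_neg hex, if_neg ?_]
        rintro ⟨t', h1, h2⟩
        rcases List.mem_cons.mp h1 with rfl | h1
        · rw [htw] at h2
          injection h2 with _ h3
          exact hwv h3
        · exact hex ⟨t', h1, h2⟩

lemma contains_iff (x : String) (v : List Char) (hx : x.toList = '_' :: v) (L : List String) :
    L.contains x = true ↔ ∃ t ∈ L, t.toList = '_' :: v := by
  induction L with
  | nil => simp
  | cons t rest ih =>
    simp only [List.contains_cons, Bool.or_eq_true, ih, List.mem_cons]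
    constructor
    · rintro (h | ⟨t', h1, h2⟩)
      · exact ⟨t, Or.inl rfl, by rw [← beq_iff_eq.mp h, hx]⟩
      · exact ⟨t', Or.inr h1, h2⟩
    · rintro ⟨t', (rfl | h1), h2⟩
      · exact Or.inl (beq_iff_eq.mpr (String.toList_inj.mp (hx.trans h2.symm)))
      · exact Or.inr ⟨t', h1, h2⟩

lemma tail_eq (s : String) :
    pvLoopA pvSuffixes s =
      (if PySem.Str.rfind s "_" != -1 &&
          PySem.Set.contains pvSuffixSet (PySem.Str.slice s (some (PySem.Str.rfind s "_")) none) then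
        PySem.Str.slice s none (some (PySem.Str.rfind s "_"))
      else s) := by
  by_cases hmem : '_' ∈ s.toList
  · obtain ⟨u, v, hs, hv⟩ := last_underscore hmem
    have hrfind : PySem.Str.rfind s "_" = (u.length : Int) := by
      rw [PySem.Str.rfind_eq]
      show PySem.Chars.rfind.go s.toList ['_'] s.toList.length = _
      rw [hs]
      exact rfind_go_last u v hv _ (by simp)
    have hslice_from : (PySem.Str.slice s (some ((u.length : Int))) none).toList = '_' :: v := by
      rw [PySem.Str.toList_slice, PySem.Chars.slice_eq_listSlice,
          PySem.List.slice_from_natCast, hs, List.drop_left]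
    have hne : (((u.length : Int)) != -1) = true := by
      simp only [bne_iff_ne, ne_eq]
      omega
    have hsetL : PySem.Set.contains pvSuffixSet
          (PySem.Str.slice s (some ((u.length : Int))) none)
        = pvSuffixes.contains (PySem.Str.slice s (some ((u.length : Int))) none) := by
      rw [PySem.Set.contains, show pvSuffixSet = pvSuffixes from by decide]
    rw [hrfind, hne, Bool.true_and,
        loopA_eq s u v hs hv pvSuffixes suffixes_shape, hsetL]
    by_cases hex : ∃ t ∈ pvSuffixes, t.toList = '_' :: v
    · rw [if_pos hex, if_pos ((contains_iff _ v hslice_from pvSuffixes).mpr hex)]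
    · rw [if_neg hex, if_neg ?_]
      intro hc
      exact hex ((contains_iff _ v hslice_from pvSuffixes).mp hc)
  · have hA : pvLoopA pvSuffixes s = s :=
      loopA_no_match pvSuffixes s hmem (by decide)
    have hr : PySem.Chars.rfind s.toList ['_'] = -1 := by
      show PySem.Chars.rfind.go s.toList ['_'] s.toList.length = -1
      exact rfind_go_not_mem s.toList hmem _
    simp [hA, hr]

-- ===== VERDICT (by name: the statement is the Claim_ definition above) =====
theorem get_base_field_name_spec : Claim_equal_get_base_field_name := by
  intro field _
  unfold Spec_get_base_field_name get_base_field_name get_base_field_name_alt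
  exact tail_eq _
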